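-- pv_equiv track=rewrite | github.com/Leonardo-de-los-rios/inteligencia-artificial | Parcial 1/solucion 2/ag3.py | get_top_enclosed_area
-- ===== SOURCE A (Python) =====
-- CONTAINER_WIDTH = 10
--
-- def get_top_enclosed_area(solution):
--     highest_top = max(rect[1] + rect[3] for rect in solution)
--     top_enclosed_area = 0
--     for x in range(CONTAINER_WIDTH):
--         is_obstructed = False
--         for rect in solution:
--             if rect[0] <= x < rect[0] + rect[2] and rect[1] <= highest_top:
--                 is_obstructed = True
--                 break
--         if is_obstructed:
--             top_enclosed_area += 1
--     return top_enclosed_area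
-- ===== SOURCE B (Python) =====
-- CONTAINER_WIDTH = 10
--
-- def get_top_enclosed_area(solution):
--     highest_top = max(rect[1] + rect[3] for rect in solution)
--     covered = set()
--     for rect in solution:
--         if rect[1] <= highest_top:
--             covered.update(range(max(0, rect[0]),
--                                  min(CONTAINER_WIDTH, rect[0] + rect[2])))
--     return len(covered)
-- ===== Notes on version B (the rewrite author's own statement) =====
-- stated objective: alternative
-- what changed: Inverted the nesting: instead of scanning every rectangle for each of the 10 columns with a break, B makes one pass over the rectangles, adding each rectangle's clamped column range to a set, and returns the set's size.
import Mathlib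
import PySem

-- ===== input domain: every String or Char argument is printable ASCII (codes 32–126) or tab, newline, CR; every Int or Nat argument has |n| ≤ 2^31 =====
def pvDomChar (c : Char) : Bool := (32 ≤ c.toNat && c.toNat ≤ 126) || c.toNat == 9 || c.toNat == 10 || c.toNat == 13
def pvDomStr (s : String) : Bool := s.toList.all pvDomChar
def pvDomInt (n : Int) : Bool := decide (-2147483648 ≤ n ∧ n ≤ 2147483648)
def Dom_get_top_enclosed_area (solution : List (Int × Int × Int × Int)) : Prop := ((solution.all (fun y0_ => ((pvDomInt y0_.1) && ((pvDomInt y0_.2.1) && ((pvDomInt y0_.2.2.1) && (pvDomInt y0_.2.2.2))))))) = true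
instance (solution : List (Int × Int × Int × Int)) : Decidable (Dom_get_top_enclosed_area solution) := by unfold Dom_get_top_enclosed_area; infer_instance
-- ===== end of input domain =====

-- ===== PORT A =====
-- B inverts A's column-outer/rectangle-inner break-scan into one rectangle pass
-- filling a set of clamped covered columns (objective: alternative decomposition).
def get_top_enclosed_area (solution : List (Int × Int × Int × Int)) : Int :=
  match solution with
  | [] => 0  -- unreachable: Python's max raises ValueError here (excluded by Pre_)
  | r0 :: rest =>
    let highest_top : Int :=
      (rest.map (fun r => r.2.1 + r.2.2.2)).foldl max (r0.2.1 + r0.2.2.2)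
    (PySem.List.pyRange 0 10 1).foldl (fun top_enclosed_area x =>
      -- inner for-loop with break = first rect matching, i.e. List.any
      let is_obstructed := solution.any (fun r =>
        decide (r.1 ≤ x) && decide (x < r.1 + r.2.2.1) && decide (r.2.1 ≤ highest_top))
      if is_obstructed then top_enclosed_area + 1 else top_enclosed_area) 0

-- ===== PORT B =====
def get_top_enclosed_area_alt (solution : List (Int × Int × Int × Int)) : Int :=
  match solution with
  | [] => 0  -- unreachable under Pre_
  | r0 :: rest =>
    let highest_top : Int :=
      (rest.map (fun r => r.2.1 + r.2.2.2)).foldl max (r0.2.1 + r0.2.2.2)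
    let covered : PySem.Set Int := solution.foldl (fun covered r =>
      if r.2.1 ≤ highest_top then
        PySem.Set.update covered
          (PySem.List.pyRange (max 0 r.1) (min 10 (r.1 + r.2.2.1)) 1)
      else covered) PySem.Set.empty
    PySem.Set.len covered

-- ===== PRECONDITION & SPEC =====
-- Python's max(...) raises ValueError on an empty solution; Pre_ excludes exactly that.
def Pre_get_top_enclosed_area (solution : List (Int × Int × Int × Int)) : Prop :=
  solution ≠ []
instance (solution : List (Int × Int × Int × Int)) : Decidable (Pre_get_top_enclosed_area solution) := by unfold Pre_get_top_enclosed_area; infer_instance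
def pvWitness_get_top_enclosed_area : (List (Int × Int × Int × Int)) := [(2, 0, 3, 4)]
def Spec_get_top_enclosed_area (solution : List (Int × Int × Int × Int)) (out : Int) : Prop := out = get_top_enclosed_area_alt solution
instance (solution : List (Int × Int × Int × Int)) (out : Int) : Decidable (Spec_get_top_enclosed_area solution out) := by unfold Spec_get_top_enclosed_area; infer_instance

-- ===== CLAIM (what is proved, stated in full; the proofs are below) =====
def Claim_equal_get_top_enclosed_area : Prop := ∀ (solution : List (Int × Int × Int × Int)), Dom_get_top_enclosed_area solution → Pre_get_top_enclosed_area solution → Spec_get_top_enclosed_area solution (get_top_enclosed_area solution)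

-- ===== LEMMAS AND PROOFS =====

-- A's counting loop is a countP over the scanned range.
theorem pv_foldl_count (p : Int → Bool) (L : List Int) (c : Int) :
    L.foldl (fun acc x => if p x then acc + 1 else acc) c = c + (L.countP p : Int) := by
  induction L generalizing c with
  | nil => simp
  | cons a L ih =>
    simp only [List.foldl_cons, List.countP_cons, ih]
    by_cases h : p a = true <;> simp [h] <;> omega

-- Membership in B's accumulated set of covered columns.
theorem pv_mem_covered (ht : Int) (l : List (Int × Int × Int × Int))
    (s : PySem.Set Int) (x : Int) :
    x ∈ l.foldl (fun covered r =>
        if r.2.1 ≤ ht then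
          PySem.Set.update covered
            (PySem.List.pyRange (max 0 r.1) (min 10 (r.1 + r.2.2.1)) 1)
        else covered) s ↔
      x ∈ s ∨ ∃ r ∈ l, r.2.1 ≤ ht ∧ 0 ≤ x ∧ x < 10 ∧ r.1 ≤ x ∧ x < r.1 + r.2.2.1 := by
  induction l generalizing s with
  | nil => simp
  | cons r l ih =>
    simp only [List.foldl_cons]
    by_cases h : r.2.1 ≤ ht
    · rw [if_pos h, ih]
      simp only [PySem.Set.mem_update, PySem.List.mem_pyRange_one, List.mem_cons]
      constructor
      · rintro ((hs | hr) | ⟨r', hr', hc⟩)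
        · exact Or.inl hs
        · exact Or.inr ⟨r, Or.inl rfl, h, by omega⟩
        · exact Or.inr ⟨r', Or.inr hr', hc⟩
      · rintro (hs | ⟨r', (rfl | hr'), hc⟩)
        · exact Or.inl (Or.inl hs)
        · exact Or.inl (Or.inr (by omega))
        · exact Or.inr ⟨r', hr', hc⟩
    · rw [if_neg h, ih]
      constructor
      · rintro (hs | ⟨r', hr', hc⟩)
        · exact Or.inl hs
        · exact Or.inr ⟨r', List.mem_cons_of_mem _ hr', hc⟩
      · rintro (hs | ⟨r', hr', hc⟩)
        · exact Or.inl hs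
        · rcases List.mem_cons.mp hr' with rfl | hm
          · exact absurd hc.1 h
          · exact Or.inr ⟨r', hm, hc⟩

-- B's accumulated set stays duplicate-free.
theorem pv_nodup_covered (ht : Int) (l : List (Int × Int × Int × Int))
    (s : PySem.Set Int) (hs : s.Nodup) :
    (l.foldl (fun covered r =>
        if r.2.1 ≤ ht then
          PySem.Set.update covered
            (PySem.List.pyRange (max 0 r.1) (min 10 (r.1 + r.2.2.1)) 1)
        else covered) s).Nodup := by
  induction l generalizing s with
  | nil => exact hs
  | cons r l ih =>
    simp only [List.foldl_cons]
    split
    · exact ih _ (PySem.Set.nodup_update _ _ hs)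
    · exact ih _ hs

-- ===== VERDICT (by name: the statement is the Claim_ definition above) =====
theorem get_top_enclosed_area_spec : Claim_equal_get_top_enclosed_area := by
  intro solution _ hpre
  unfold Spec_get_top_enclosed_area get_top_enclosed_area get_top_enclosed_area_alt
  match solution with
  | [] => exact absurd rfl hpre
  | r0 :: rest =>
    simp only []
    set sol := r0 :: rest with hsol
    set ht : Int := (rest.map (fun r => r.2.1 + r.2.2.2)).foldl max (r0.2.1 + r0.2.2.2) with hht
    set p : Int → Bool := fun x => sol.any (fun r =>
        decide (r.1 ≤ x) && decide (x < r.1 + r.2.2.1) && decide (r.2.1 ≤ ht)) with hp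
    set covered := sol.foldl (fun covered r =>
      if r.2.1 ≤ ht then
        PySem.Set.update covered
          (PySem.List.pyRange (max 0 r.1) (min 10 (r.1 + r.2.2.1)) 1)
      else covered) PySem.Set.empty with hcov
    rw [pv_foldl_count, zero_add]
    have hlen : PySem.Set.len covered = (covered.length : Int) := rfl
    rw [hlen, List.countP_eq_length_filter]
    congr 1
    have hperm : List.Perm ((PySem.List.pyRange 0 10 1).filter p) covered := by
      rw [List.perm_ext_iff_of_nodup
            (List.Nodup.filter _ (PySem.List.nodup_pyRange_one 0 10))
            (pv_nodup_covered ht sol PySem.Set.empty List.nodup_nil)]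
      intro x
      rw [List.mem_filter, pv_mem_covered]
      simp only [PySem.List.mem_pyRange_one, hp, List.any_eq_true, Bool.and_eq_true,
        decide_eq_true_eq, PySem.Set.empty, List.not_mem_nil, false_or]
      tauto
    exact hperm.length_eq
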